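-- pv_equiv track=rewrite | github.com/Jerobou/COUSIN | php/cousin_for_download/cousin_functions.py | create_dicodon_dict
-- ===== SOURCE A (Python) =====
-- def create_dicodon_dict(genetic_code_ref) :
--
-- 	dicodon_dict = {}
--
-- 	for amino_acid in genetic_code_ref :
-- 		if amino_acid != "*" :
-- 			for first_codon in genetic_code_ref[amino_acid] :
--
-- 				if first_codon not in dicodon_dict :
-- 					dicodon_dict[first_codon] = {}
--
-- 				for amino_acid in genetic_code_ref :
-- 					for second_codon in genetic_code_ref[amino_acid]:
-- 						if second_codon not in dicodon_dict[first_codon] :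
-- 							dicodon_dict[first_codon][second_codon] = None
--
-- 	return dicodon_dict
-- ===== SOURCE B (Python) =====
-- def create_dicodon_dict(genetic_code_ref):
--     # Build the inner template once: every codon of every amino acid -> None,
--     # in first-occurrence order; then give each first codon a fresh copy.
--     template = {}
--     for codons in genetic_code_ref.values():
--         for codon in codons:
--             if codon not in template:
--                 template[codon] = None
--
--     result = {}
--     for amino_acid, codons in genetic_code_ref.items():
--         if amino_acid != "*":
--             for first_codon in codons:
--                 if first_codon not in result:
--                     result[first_codon] = dict(template)
--     return result
-- ===== Notes on version B (the rewrite author's own statement) =====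
-- stated objective: faster
-- what changed: A re-derives the full inner codon dict from scratch (nested scan over all amino acids and codons with linear membership checks) for every occurrence of every first codon; B builds that inner template once in a single pass and then hands each new first codon a fresh copy of it.
import Mathlib
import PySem

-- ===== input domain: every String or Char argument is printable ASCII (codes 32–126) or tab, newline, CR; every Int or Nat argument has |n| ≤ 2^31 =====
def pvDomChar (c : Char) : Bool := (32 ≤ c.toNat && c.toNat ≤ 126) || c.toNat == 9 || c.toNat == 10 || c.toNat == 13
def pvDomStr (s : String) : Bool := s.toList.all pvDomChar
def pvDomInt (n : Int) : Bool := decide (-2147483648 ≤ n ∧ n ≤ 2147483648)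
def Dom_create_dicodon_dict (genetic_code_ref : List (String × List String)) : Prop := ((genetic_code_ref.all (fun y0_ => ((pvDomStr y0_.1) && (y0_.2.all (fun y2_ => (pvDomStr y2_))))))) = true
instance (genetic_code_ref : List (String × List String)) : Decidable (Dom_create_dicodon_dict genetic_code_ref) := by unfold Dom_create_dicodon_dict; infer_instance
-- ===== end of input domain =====

-- B builds the inner codon template once and copies it per first codon, instead of
-- A's re-derivation of the whole inner dict for every first-codon occurrence.

-- ===== PORT A =====
-- genetic_code_ref[amino_acid]: first-match association-list lookup (Python dict lookup;
-- the key always comes from iterating the dict itself, so the default branch is unreachable)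
def pyLookupA (d : List (String × List String)) (k : String) : List String :=
  ((d.find? (fun p => p.1 == k)).map (·.2)).getD []

-- the inner double loop: for amino_acid in gcr: for second_codon in gcr[amino_acid]:
--   if second_codon not in m: m[second_codon] = None
def aFill (gcr : List (String × List String)) (m : List (String × Option String)) :
    List (String × Option String) :=
  gcr.foldl (fun m p =>
    (pyLookupA gcr p.1).foldl (fun m sc =>
      if m.any (fun q => q.1 == sc) then m else m ++ [(sc, none)]) m) m

-- dicodon_dict[first_codon] = <updated inner dict> (update in place, key order kept)
def aUpdate (dd : List (String × List (String × Option String))) (k : String)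
    (f : List (String × Option String) → List (String × Option String)) :
    List (String × List (String × Option String)) :=
  dd.map (fun q => if q.1 == k then (q.1, f q.2) else q)

def create_dicodon_dict (genetic_code_ref : List (String × List String)) :
    List (String × List (String × Option String)) :=
  genetic_code_ref.foldl (fun dd p =>
    if p.1 == "*" then dd
    else (pyLookupA genetic_code_ref p.1).foldl (fun dd fc =>
      aUpdate (if dd.any (fun q => q.1 == fc) then dd else dd ++ [(fc, [])]) fc
        (fun m => aFill genetic_code_ref m)) dd) []

-- ===== PORT B =====
-- template: every codon of every amino acid -> None, first-occurrence order
def bTemplate (gcr : List (String × List String)) : List (String × Option String) :=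
  gcr.foldl (fun t p => p.2.foldl (fun t c =>
    if t.any (fun q => q.1 == c) then t else t ++ [(c, none)]) t) []

-- result: template computed ONCE, then a fresh copy stored per new first codon
def bBuild (gcr : List (String × List String)) (t : List (String × Option String)) :
    List (String × List (String × Option String)) :=
  gcr.foldl (fun r p =>
    if p.1 == "*" then r
    else p.2.foldl (fun r fc =>
      if r.any (fun q => q.1 == fc) then r else r ++ [(fc, t)]) r) []

def create_dicodon_dict_alt (genetic_code_ref : List (String × List String)) :
    List (String × List (String × Option String)) :=
  bBuild genetic_code_ref (bTemplate genetic_code_ref)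

-- ===== PRECONDITION & SPEC =====
-- Pre_ excludes association lists with duplicate keys: the Python parameter is a dict,
-- where duplicate keys cannot exist (a dict literal collapses them), so such lists have
-- no faithful Python counterpart.
def Pre_create_dicodon_dict (genetic_code_ref : List (String × List String)) : Prop :=
  (genetic_code_ref.map (·.1)).Nodup
instance (genetic_code_ref : List (String × List String)) : Decidable (Pre_create_dicodon_dict genetic_code_ref) := by unfold Pre_create_dicodon_dict; infer_instance

def pvWitness_create_dicodon_dict : (List (String × List String)) :=
  [("M", ["ATG"]), ("L", ["TTA", "TTG"]), ("*", ["TAA"])]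

def Spec_create_dicodon_dict (genetic_code_ref : List (String × List String)) (out : List (String × List (String × Option String))) : Prop := out = create_dicodon_dict_alt genetic_code_ref
instance (genetic_code_ref : List (String × List String)) (out : List (String × List (String × Option String))) : Decidable (Spec_create_dicodon_dict genetic_code_ref out) := by unfold Spec_create_dicodon_dict; infer_instance

-- ===== CLAIM (what is proved, stated in full; the proofs are below) =====
def Claim_equal_create_dicodon_dict : Prop := ∀ (genetic_code_ref : List (String × List String)), Dom_create_dicodon_dict genetic_code_ref → Pre_create_dicodon_dict genetic_code_ref → Spec_create_dicodon_dict genetic_code_ref (create_dicodon_dict genetic_code_ref)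

-- ===== LEMMAS AND PROOFS =====

-- key-membership in an inner association list
def hasKey (m : List (String × Option String)) (c : String) : Bool :=
  m.any (fun q => q.1 == c)

-- with nodup keys, looking up a pair's own key gives its own value
theorem lookup_self (gcr : List (String × List String))
    (h : (gcr.map (·.1)).Nodup) (p : String × List String) (hp : p ∈ gcr) :
    pyLookupA gcr p.1 = p.2 := by
  induction gcr with
  | nil => cases hp
  | cons x xs ih =>
    simp only [List.map_cons, List.nodup_cons] at h
    rcases List.mem_cons.mp hp with rfl | hp'
    · simp [pyLookupA]
    · have hne : ¬ ((fun q => q.1 == p.1) x = true) := by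
        simp only [beq_iff_eq]
        intro he; exact h.1 (he ▸ List.mem_map_of_mem hp')
      have htail := ih h.2 hp'
      unfold pyLookupA at htail ⊢
      rw [show List.find? (fun q => q.1 == p.1) (x :: xs) = List.find? (fun q => q.1 == p.1) xs
        from List.find?_cons_of_neg hne]
      exact htail

-- the inner per-codon step
def stepC (m : List (String × Option String)) (c : String) : List (String × Option String) :=
  if m.any (fun q => q.1 == c) then m else m ++ [(c, none)]

theorem hasKey_stepC (m : List (String × Option String)) (c d : String)
    (h : hasKey m d = true) : hasKey (stepC m c) d = true := by
  unfold stepC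
  split
  · exact h
  · unfold hasKey at h ⊢
    rw [List.any_append, h, Bool.true_or]

theorem hasKey_foldl_stepC (xs : List String) (m : List (String × Option String)) (d : String)
    (h : hasKey m d = true) : hasKey (xs.foldl stepC m) d = true := by
  induction xs generalizing m with
  | nil => exact h
  | cons x xs ih => exact ih _ (hasKey_stepC m x d h)

theorem hasKey_stepC_self (m : List (String × Option String)) (c : String) :
    hasKey (stepC m c) c = true := by
  unfold stepC
  split
  · assumption
  · unfold hasKey
    rw [List.any_append]
    simp

theorem hasKey_foldl_stepC_of_mem (xs : List String) (m : List (String × Option String))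
    (d : String) (h : d ∈ xs) : hasKey (xs.foldl stepC m) d = true := by
  induction xs generalizing m with
  | nil => cases h
  | cons x xs ih =>
    rcases List.mem_cons.mp h with rfl | h'
    · exact hasKey_foldl_stepC xs _ d (hasKey_stepC_self m d)
    · exact ih _ h'

theorem foldl_stepC_fixed (xs : List String) (m : List (String × Option String))
    (h : ∀ c ∈ xs, hasKey m c = true) : xs.foldl stepC m = m := by
  induction xs with
  | nil => rfl
  | cons x xs ih =>
    have hx : stepC m x = m := by
      have hk := h x (List.mem_cons_self)
      unfold hasKey at hk
      unfold stepC
      rw [hk]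
      rfl
    rw [List.foldl_cons, hx]
    exact ih (fun c hc => h c (List.mem_cons_of_mem _ hc))

-- aFill rewritten to iterate each pair's own codon list (under nodup keys)
theorem aFill_eq (gcr : List (String × List String)) (h : (gcr.map (·.1)).Nodup)
    (m : List (String × Option String)) :
    aFill gcr m = gcr.foldl (fun m p => p.2.foldl stepC m) m := by
  unfold aFill
  exact PySem.List.foldl_congr_mem _ _ _ _ (fun acc p hp => by
    rw [lookup_self gcr h p hp]
    exact rfl)

-- the fold over all pairs is monotone in keys
theorem hasKey_bigfold (l : List (String × List String)) (m : List (String × Option String))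
    (d : String) (h : hasKey m d = true) :
    hasKey (l.foldl (fun m p => p.2.foldl stepC m) m) d = true := by
  induction l generalizing m with
  | nil => exact h
  | cons x xs ih => exact ih _ (hasKey_foldl_stepC _ _ _ h)

-- and afterwards contains every codon of every pair
theorem hasKey_bigfold_of_mem (l : List (String × List String))
    (m : List (String × Option String)) (p : String × List String) (hp : p ∈ l)
    (c : String) (hc : c ∈ p.2) :
    hasKey (l.foldl (fun m p => p.2.foldl stepC m) m) c = true := by
  induction l generalizing m with
  | nil => cases hp
  | cons x xs ih =>
    rcases List.mem_cons.mp hp with rfl | hp'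
    · exact hasKey_bigfold xs (p.2.foldl stepC m) c (hasKey_foldl_stepC_of_mem p.2 m c hc)
    · exact ih (x.2.foldl stepC m) hp'

-- the template contains every codon of gcr
theorem hasKey_template (gcr : List (String × List String)) (p : String × List String)
    (hp : p ∈ gcr) (c : String) (hc : c ∈ p.2) : hasKey (bTemplate gcr) c = true :=
  hasKey_bigfold_of_mem gcr [] p hp c hc

-- filling an already-full template changes nothing
theorem aFill_template (gcr : List (String × List String)) (h : (gcr.map (·.1)).Nodup) :
    aFill gcr (bTemplate gcr) = bTemplate gcr := by
  rw [aFill_eq gcr h]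
  have key : ∀ (l : List (String × List String)), (∀ p ∈ l, p ∈ gcr) →
      l.foldl (fun m p => p.2.foldl stepC m) (bTemplate gcr) = bTemplate gcr := by
    intro l
    induction l with
    | nil => intro _; rfl
    | cons x xs ih =>
      intro hsub
      rw [List.foldl_cons,
        foldl_stepC_fixed _ _ (fun c hc => hasKey_template gcr x (hsub x (List.mem_cons_self)) c hc)]
      exact ih (fun p hp => hsub p (List.mem_cons_of_mem _ hp))
  exact key gcr (fun p hp => hp)

-- filling the empty dict gives exactly the template
theorem aFill_nil (gcr : List (String × List String)) (h : (gcr.map (·.1)).Nodup) :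
    aFill gcr [] = bTemplate gcr := aFill_eq gcr h []

-- A's per-first-codon step equals B's, given every stored value is the template
theorem inner_step_eq (gcr : List (String × List String)) (h : (gcr.map (·.1)).Nodup)
    (dd : List (String × List (String × Option String))) (fc : String)
    (hinv : ∀ q ∈ dd, q.2 = bTemplate gcr) :
    aUpdate (if dd.any (fun q => q.1 == fc) then dd else dd ++ [(fc, [])]) fc
        (fun m => aFill gcr m) =
      (if dd.any (fun q => q.1 == fc) then dd else dd ++ [(fc, bTemplate gcr)]) := by
  by_cases hk : dd.any (fun q => q.1 == fc) = true
  · rw [if_pos hk, if_pos hk]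
    unfold aUpdate
    have hid : ∀ q ∈ dd, (if q.1 == fc then (q.1, aFill gcr q.2) else q) = q := by
      intro q hq
      split
      · rw [hinv q hq, aFill_template gcr h, ← hinv q hq]
      · rfl
    rw [List.map_congr_left hid, List.map_id']
  · rw [if_neg hk, if_neg hk]
    unfold aUpdate
    rw [List.map_append]
    have hid : ∀ q ∈ dd, (if q.1 == fc then (q.1, aFill gcr q.2) else q) = q := by
      intro q hq
      have hne : (q.1 == fc) = false := by
        by_contra hcontra
        rw [Bool.not_eq_false] at hcontra
        exact hk (List.any_eq_true.mpr ⟨q, hq, hcontra⟩)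
      rw [hne]
      rfl
    rw [List.map_congr_left hid, List.map_id', List.map_singleton]
    simp only [beq_self_eq_true, if_true]
    rw [aFill_nil gcr h]

-- A's inner loop over a codon list equals B's, preserving the all-template invariant
theorem inner_fold_eq (gcr : List (String × List String)) (h : (gcr.map (·.1)).Nodup)
    (xs : List String) (dd : List (String × List (String × Option String)))
    (hinv : ∀ q ∈ dd, q.2 = bTemplate gcr) :
    xs.foldl (fun dd fc =>
        aUpdate (if dd.any (fun q => q.1 == fc) then dd else dd ++ [(fc, [])]) fc
          (fun m => aFill gcr m)) dd =
      xs.foldl (fun r fc =>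
        if r.any (fun q => q.1 == fc) then r else r ++ [(fc, bTemplate gcr)]) dd ∧
    (∀ q ∈ xs.foldl (fun r fc =>
        if r.any (fun q => q.1 == fc) then r else r ++ [(fc, bTemplate gcr)]) dd,
      q.2 = bTemplate gcr) := by
  induction xs generalizing dd with
  | nil => exact ⟨rfl, hinv⟩
  | cons x xs ih =>
    have hstep := inner_step_eq gcr h dd x hinv
    have hinv' : ∀ q ∈ (if dd.any (fun q => q.1 == x) then dd else dd ++ [(x, bTemplate gcr)]),
        q.2 = bTemplate gcr := by
      split
      · exact hinv
      · intro q hq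
        rcases List.mem_append.mp hq with hq' | hq'
        · exact hinv q hq'
        · rw [List.mem_singleton.mp hq']
    rw [List.foldl_cons, List.foldl_cons, hstep]
    exact ih _ hinv'

-- ===== VERDICT (by name: the statement is the Claim_ definition above) =====
theorem create_dicodon_dict_spec : Claim_equal_create_dicodon_dict := by
  intro gcr _ hpre
  unfold Spec_create_dicodon_dict create_dicodon_dict create_dicodon_dict_alt bBuild
  have main : ∀ (l : List (String × List String)), (∀ p ∈ l, p ∈ gcr) →
      ∀ dd, (∀ q ∈ dd, q.2 = bTemplate gcr) →
      l.foldl (fun dd p =>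
          if p.1 == "*" then dd
          else (pyLookupA gcr p.1).foldl (fun dd fc =>
            aUpdate (if dd.any (fun q => q.1 == fc) then dd else dd ++ [(fc, [])]) fc
              (fun m => aFill gcr m)) dd) dd =
        l.foldl (fun r p =>
          if p.1 == "*" then r
          else p.2.foldl (fun r fc =>
            if r.any (fun q => q.1 == fc) then r else r ++ [(fc, bTemplate gcr)]) r) dd ∧
      (∀ q ∈ l.foldl (fun r p =>
          if p.1 == "*" then r
          else p.2.foldl (fun r fc =>
            if r.any (fun q => q.1 == fc) then r else r ++ [(fc, bTemplate gcr)]) r) dd,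
        q.2 = bTemplate gcr) := by
    intro l
    induction l with
    | nil => exact fun _ dd hinv => ⟨rfl, hinv⟩
    | cons x xs ih =>
      intro hsub dd hinv
      rw [List.foldl_cons, List.foldl_cons]
      by_cases hx : (x.1 == "*") = true
      · rw [if_pos hx, if_pos hx]
        exact ih (fun p hp => hsub p (List.mem_cons_of_mem _ hp)) dd hinv
      · rw [if_neg hx, if_neg hx, lookup_self gcr hpre x (hsub x (List.mem_cons_self))]
        obtain ⟨heq, hinv'⟩ := inner_fold_eq gcr hpre x.2 dd hinv
        rw [heq]
        exact ih (fun p hp => hsub p (List.mem_cons_of_mem _ hp)) _ hinv'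
  exact (main gcr (fun p hp => hp) [] (fun q hq => absurd hq (List.not_mem_nil))).1
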